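-- pv_equiv track=rewrite | github.com/caijstevens/adscoursework125 | src/q7.py | ThreePartition
-- ===== SOURCE A (Python) =====
-- def ThreePartition(L,P0,P1):
--     """Return a triple (L0,L1,L2) of sublists of L
--
--     L0 consists of all elements of L smaller or equal P0,
--     L1 of all elements of L larger than P0 but smaller or
--     equal P1, and L2 of all elements of L larger than P1
--     """
--     L0 = []
--     L1 = []
--     L2 = []
--     for i in range(len(L)):
--         if L[i] <= P0:
--             L0.append(L[i])
--         elif L[i] <= P1:
--             L1.append(L[i])
--         else:
--             L2.append(L[i])
--
--     return (L0, L1, L2)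
-- ===== SOURCE B (Python) =====
-- def ThreePartition(L, P0, P1):
--     """Return a triple (L0,L1,L2) of sublists of L partitioned by P0 and P1."""
--     L0 = [x for x in L if x <= P0]
--     L1 = [x for x in L if not (x <= P0) and x <= P1]
--     L2 = [x for x in L if not (x <= P0) and not (x <= P1)]
--     return (L0, L1, L2)
-- ===== Notes on version B (the rewrite author's own statement) =====
-- stated objective: alternative
-- what changed: Replaced the single index loop with three branching appends by three independent list comprehensions, one per bucket, each with its own predicate.
import Mathlib
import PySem

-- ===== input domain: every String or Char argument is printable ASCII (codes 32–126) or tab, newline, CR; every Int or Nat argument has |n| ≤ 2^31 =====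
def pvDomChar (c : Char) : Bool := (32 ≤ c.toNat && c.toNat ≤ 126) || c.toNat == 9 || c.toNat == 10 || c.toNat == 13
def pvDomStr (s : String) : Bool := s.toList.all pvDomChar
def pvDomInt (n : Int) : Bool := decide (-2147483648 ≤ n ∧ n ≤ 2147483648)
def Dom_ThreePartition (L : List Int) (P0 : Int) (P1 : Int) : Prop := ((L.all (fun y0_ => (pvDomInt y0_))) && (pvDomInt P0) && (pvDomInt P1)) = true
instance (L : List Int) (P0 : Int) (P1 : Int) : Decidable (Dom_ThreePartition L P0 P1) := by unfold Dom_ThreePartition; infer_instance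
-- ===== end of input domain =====

-- ===== PORT A =====
-- Index loop for i in range(len(L)) with if/elif/else appends (L[i] via pyGetD; i always in range).
def ThreePartition (L : List Int) (P0 : Int) (P1 : Int) : List Int × List Int × List Int :=
  (PySem.List.pyRange 0 (L.length : Int) 1).foldl
    (fun acc i =>
      let x := PySem.List.pyGetD L i 0
      if x ≤ P0 then (acc.1 ++ [x], acc.2.1, acc.2.2)
      else if x ≤ P1 then (acc.1, acc.2.1 ++ [x], acc.2.2)
      else (acc.1, acc.2.1, acc.2.2 ++ [x]))
    ([], [], [])

-- ===== PORT B =====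
-- Three independent comprehensions, one per bucket.
def ThreePartition_alt (L : List Int) (P0 : Int) (P1 : Int) : List Int × List Int × List Int :=
  (L.filter (fun x => decide (x ≤ P0)),
   L.filter (fun x => !decide (x ≤ P0) && decide (x ≤ P1)),
   L.filter (fun x => !decide (x ≤ P0) && !decide (x ≤ P1)))

-- ===== PRECONDITION & SPEC =====
def Spec_ThreePartition (L : List Int) (P0 : Int) (P1 : Int) (out : List Int × List Int × List Int) : Prop := out = ThreePartition_alt L P0 P1
instance (L : List Int) (P0 : Int) (P1 : Int) (out : List Int × List Int × List Int) : Decidable (Spec_ThreePartition L P0 P1 out) := by unfold Spec_ThreePartition; infer_instance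

-- ===== CLAIM (what is proved, stated in full; the proofs are below) =====
def Claim_equal_ThreePartition : Prop := ∀ (L : List Int) (P0 : Int) (P1 : Int), Dom_ThreePartition L P0 P1 → Spec_ThreePartition L P0 P1 (ThreePartition L P0 P1)

-- ===== LEMMAS AND PROOFS =====

-- ===== VERDICT (by name: the statement is the Claim_ definition above) =====
theorem tp_loop (L : List Int) (P0 P1 : Int) (a b c : List Int) :
    L.foldl
      (fun acc x =>
        if x ≤ P0 then (acc.1 ++ [x], acc.2.1, acc.2.2)
        else if x ≤ P1 then (acc.1, acc.2.1 ++ [x], acc.2.2)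
        else (acc.1, acc.2.1, acc.2.2 ++ [x]))
      (a, b, c)
    = (a ++ L.filter (fun x => decide (x ≤ P0)),
       b ++ L.filter (fun x => !decide (x ≤ P0) && decide (x ≤ P1)),
       c ++ L.filter (fun x => !decide (x ≤ P0) && !decide (x ≤ P1))) := by
  induction L generalizing a b c with
  | nil => simp
  | cons x xs ih =>
    by_cases h0 : x ≤ P0
    · simp [List.foldl_cons, h0, ih]
    · by_cases h1 : x ≤ P1 <;> simp [List.foldl_cons, h0, h1, ih]

theorem ThreePartition_spec : Claim_equal_ThreePartition := by
  intro L P0 P1 _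
  unfold Spec_ThreePartition ThreePartition ThreePartition_alt
  show (PySem.List.pyRange 0 (L.length : Int) 1).foldl
      (fun acc i =>
        if PySem.List.pyGetD L i 0 ≤ P0 then (acc.1 ++ [PySem.List.pyGetD L i 0], acc.2.1, acc.2.2)
        else if PySem.List.pyGetD L i 0 ≤ P1 then (acc.1, acc.2.1 ++ [PySem.List.pyGetD L i 0], acc.2.2)
        else (acc.1, acc.2.1, acc.2.2 ++ [PySem.List.pyGetD L i 0]))
      ([], [], []) = _
  rw [PySem.List.foldl_pyRange_zero_pyGetD'
      (f := fun acc x =>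
        if x ≤ P0 then (acc.1 ++ [x], acc.2.1, acc.2.2)
        else if x ≤ P1 then (acc.1, acc.2.1 ++ [x], acc.2.2)
        else (acc.1, acc.2.1, acc.2.2 ++ [x]))]
  exact tp_loop L P0 P1 [] [] []
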